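-- pv_equiv track=rewrite | github.com/Waltham-Data-Science/ndi-data-browser-v2 | backend/services/summary_table_service.py | _probe_location_split
-- ===== SOURCE A (Python) =====
-- from typing import Any
--
-- def _clean(v: Any) -> Any:
--     """Normalize empty-string / whitespace-only to None. Pass through other types."""
--     if v is None:
--         return None
--     if isinstance(v, str):
--         s: str = v.strip()
--         return s if s else None
--     return v
--
-- def _probe_location_split(
--     locations: list[dict[str, Any]],
-- ) -> tuple[tuple[str | None, str | None], tuple[str | None, str | None]]:
--     """Split probe_location docs into (anatomical_location, cell_type) by the
--     ontology prefix of `probe_location.ontology_name`: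
--     - UBERON: anatomical location
--     - CL:    cell type
--     - others: bucketed as location by default
--
--     Each bucket returns (name, ontology). First hit wins per bucket.
--     """
--     loc: tuple[str | None, str | None] = (None, None)
--     cell: tuple[str | None, str | None] = (None, None)
--     for pl in locations:
--         data = (pl.get("data") or {}).get("probe_location") or {}
--         name = _clean(data.get("name"))
--         ontology = _clean(data.get("ontology_name"))
--         if ontology and ontology.upper().startswith("CL:"):
--             if cell == (None, None):
--                 cell = (name, ontology)
--         elif loc == (None, None):
--             loc = (name, ontology)
--     return loc, cell
-- ===== SOURCE B (Python) =====
-- from typing import Any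
--
-- def _clean(v: Any) -> Any:
--     """Normalize empty-string / whitespace-only to None. Pass through other types."""
--     if v is None:
--         return None
--     if isinstance(v, str):
--         s: str = v.strip()
--         return s if s else None
--     return v
--
-- def _extract(pl: dict) -> tuple:
--     data = (pl.get("data") or {}).get("probe_location") or {}
--     return (_clean(data.get("name")), _clean(data.get("ontology_name")))
--
-- def _is_cell(ontology) -> bool:
--     return bool(ontology) and ontology.upper().startswith("CL:")
--
-- def _probe_location_split(
--     locations: list,
-- ) -> tuple:
--     pairs = [_extract(pl) for pl in locations]
--     cell = next((p for p in pairs if _is_cell(p[1])), (None, None))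
--     loc = next((p for p in pairs if not _is_cell(p[1]) and p != (None, None)), (None, None))
--     return loc, cell
-- ===== Notes on version B (the rewrite author's own statement) =====
-- stated objective: idiomatic
-- what changed: Replaces the single interleaved stateful bucketing loop with an extract-all pass followed by two independent first-match searches (next over filtered generators), one per bucket.
import Mathlib
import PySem

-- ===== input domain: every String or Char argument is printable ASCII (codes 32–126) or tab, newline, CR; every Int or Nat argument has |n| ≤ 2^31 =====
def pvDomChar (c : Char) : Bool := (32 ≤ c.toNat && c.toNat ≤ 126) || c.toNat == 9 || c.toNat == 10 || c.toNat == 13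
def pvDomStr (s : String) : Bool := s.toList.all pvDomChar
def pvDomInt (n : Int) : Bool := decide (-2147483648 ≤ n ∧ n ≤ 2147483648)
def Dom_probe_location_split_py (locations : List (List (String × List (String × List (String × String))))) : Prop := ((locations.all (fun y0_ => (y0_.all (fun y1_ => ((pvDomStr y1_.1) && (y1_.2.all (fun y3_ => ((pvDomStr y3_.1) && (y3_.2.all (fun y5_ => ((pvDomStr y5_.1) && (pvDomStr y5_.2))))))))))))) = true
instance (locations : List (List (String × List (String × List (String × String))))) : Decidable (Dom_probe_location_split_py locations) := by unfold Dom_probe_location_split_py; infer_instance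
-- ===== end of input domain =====

-- B replaces A's single interleaved stateful bucketing loop with an extract-all pass plus two
-- independent first-match searches (one per bucket); same O(n) cost, objective: idiomatic.

-- ===== PORT A =====

-- _clean: None -> None; string -> strip, '' -> None (all values here are strings or absent)
def pyClean (v : Option String) : Option String :=
  match v with
  | none => none
  | some s => let t := PySem.Str.strip s; if t = "" then none else some t

def probe_location_split_py (locations : List (List (String × List (String × List (String × String))))) : (Option String × Option String) × (Option String × Option String) :=
  locations.foldl
    (fun (st : (Option String × Option String) × (Option String × Option String)) pl =>
      let loc := st.1
      let cell := st.2
      let data := ((PySem.Dict.mk ((PySem.Dict.mk pl).getD "data" [])).getD "probe_location" [])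
      let name := pyClean ((PySem.Dict.mk data).get? "name")
      let ontology := pyClean ((PySem.Dict.mk data).get? "ontology_name")
      -- `if ontology and ontology.upper().startswith("CL:")`: pyClean never returns some "", so
      -- truthiness of `ontology` is exactly `Option.isSome`
      match ontology with
      | some o =>
        if PySem.Str.startswith (PySem.Str.upper o) "CL:" then
          if cell = (none, none) then (loc, (name, some o)) else (loc, cell)
        else
          if loc = (none, none) then ((name, some o), cell) else (loc, cell)
      | none =>
        if loc = (none, none) then ((name, none), cell) else (loc, cell))
    ((none, none), (none, none))

-- ===== PORT B =====

def pvExtract (pl : List (String × List (String × List (String × String)))) : Option String × Option String :=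
  let data := ((PySem.Dict.mk ((PySem.Dict.mk pl).getD "data" [])).getD "probe_location" [])
  (pyClean ((PySem.Dict.mk data).get? "name"), pyClean ((PySem.Dict.mk data).get? "ontology_name"))

def pvIsCell (ontology : Option String) : Bool :=
  match ontology with
  | some o => PySem.Str.startswith (PySem.Str.upper o) "CL:"
  | none => false

def pvCellPred (p : Option String × Option String) : Bool := pvIsCell p.2

def pvLocPred (p : Option String × Option String) : Bool := !pvIsCell p.2 && p != (none, none)

def probe_location_split_py_alt (locations : List (List (String × List (String × List (String × String))))) : (Option String × Option String) × (Option String × Option String) :=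
  let pairs := locations.map pvExtract
  let cell := (pairs.find? pvCellPred).getD (none, none)
  let loc := (pairs.find? pvLocPred).getD (none, none)
  (loc, cell)

-- ===== PRECONDITION & SPEC =====
def Spec_probe_location_split_py (locations : List (List (String × List (String × List (String × String))))) (out : (Option String × Option String) × (Option String × Option String)) : Prop := out = probe_location_split_py_alt locations
instance (locations : List (List (String × List (String × List (String × String))))) (out : (Option String × Option String) × (Option String × Option String)) : Decidable (Spec_probe_location_split_py locations out) := by unfold Spec_probe_location_split_py; infer_instance

-- ===== CLAIM (what is proved, stated in full; the proofs are below) =====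
def Claim_equal_probe_location_split_py : Prop := ∀ (locations : List (List (String × List (String × List (String × String))))), Dom_probe_location_split_py locations → Spec_probe_location_split_py locations (probe_location_split_py locations)

-- ===== LEMMAS AND PROOFS =====

-- The loop invariant: folding A's step from any state fills each still-empty bucket with the
-- first qualifying extracted pair of the remaining list.
lemma foldA_char (ls : List (List (String × List (String × List (String × String)))))
    (st : (Option String × Option String) × (Option String × Option String)) :
    ls.foldl
      (fun (st : (Option String × Option String) × (Option String × Option String)) pl =>
        let loc := st.1
        let cell := st.2
        let data := ((PySem.Dict.mk ((PySem.Dict.mk pl).getD "data" [])).getD "probe_location" [])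
        let name := pyClean ((PySem.Dict.mk data).get? "name")
        let ontology := pyClean ((PySem.Dict.mk data).get? "ontology_name")
        match ontology with
        | some o =>
          if PySem.Str.startswith (PySem.Str.upper o) "CL:" then
            if cell = (none, none) then (loc, (name, some o)) else (loc, cell)
          else
            if loc = (none, none) then ((name, some o), cell) else (loc, cell)
        | none =>
          if loc = (none, none) then ((name, none), cell) else (loc, cell)) st
    = ((if st.1 = (none, none) then
          ((ls.map pvExtract).find? pvLocPred).getD (none, none)
        else st.1),
       (if st.2 = (none, none) then
          ((ls.map pvExtract).find? pvCellPred).getD (none, none)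
        else st.2)) := by
  induction ls generalizing st with
  | nil =>
    obtain ⟨a, b⟩ := st
    by_cases h1 : a = (none, none) <;> by_cases h2 : b = (none, none) <;> simp [h1, h2]
  | cons pl rest ih =>
    simp only [List.foldl_cons, List.map_cons]
    rcases he : pvExtract pl with ⟨nm, ont⟩
    have hn : pyClean ((PySem.Dict.mk ((PySem.Dict.mk ((PySem.Dict.mk pl).getD "data" [])).getD "probe_location" [])).get? "name") = nm := congrArg Prod.fst he
    have ho : pyClean ((PySem.Dict.mk ((PySem.Dict.mk ((PySem.Dict.mk pl).getD "data" [])).getD "probe_location" [])).get? "ontology_name") = ont := congrArg Prod.snd he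
    cases ont with
    | some o =>
      by_cases hcl : PySem.Str.startswith (PySem.Str.upper o) "CL:" = true
      · -- cell entry: taken by the cell search, skipped by the loc search
        have hc1 : pvCellPred (nm, some o) = true := hcl
        have hc2 : ¬ (pvLocPred (nm, some o) = true) := by
          simp only [pvLocPred, pvIsCell]; rw [hcl]; simp
        rw [List.find?_cons_of_pos hc1, List.find?_cons_of_neg hc2]
        simp only [hn, ho, hcl, if_true]
        by_cases hc : st.2 = (none, none)
        · rw [if_pos hc, ih]; simp [hc]
        · rw [if_neg hc, ih]; simp [hc]
      · -- non-cell entry with truthy ontology: extracted pair ≠ (none,none)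
        have hc1 : ¬ (pvCellPred (nm, some o) = true) := hcl
        have hc2 : pvLocPred (nm, some o) = true := by
          simp only [pvLocPred, pvIsCell]
          rw [Bool.eq_false_iff.mpr hcl]
          simp
        rw [List.find?_cons_of_neg hc1, List.find?_cons_of_pos hc2]
        simp only [hn, ho, hcl]
        by_cases hl : st.1 = (none, none)
        · rw [if_pos hl, ih]; simp [hl]
        · rw [if_neg hl, ih]; simp [hl]
    | none =>
      have hc1 : ¬ (pvCellPred (nm, none) = true) := by
        simp [pvCellPred, pvIsCell]
      rw [List.find?_cons_of_neg hc1]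
      cases nm with
      | none =>
        -- extracted pair is (none,none): fills neither bucket
        have hc2 : ¬ (pvLocPred ((none : Option String), (none : Option String)) = true) := by simp [pvLocPred]
        rw [List.find?_cons_of_neg hc2]
        simp only [hn, ho]
        by_cases hl : st.1 = (none, none)
        · rw [if_pos hl, ih]; simp [hl]
        · rw [if_neg hl, ih]
      | some n =>
        have hc2 : pvLocPred (some n, none) = true := by simp [pvLocPred, pvIsCell]
        rw [List.find?_cons_of_pos hc2]
        simp only [hn, ho]
        by_cases hl : st.1 = (none, none)
        · rw [if_pos hl, ih]; simp [hl]
        · rw [if_neg hl, ih]; simp [hl]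

-- ===== VERDICT (by name: the statement is the Claim_ definition above) =====
theorem probe_location_split_py_spec : Claim_equal_probe_location_split_py := by
  intro locations _
  show probe_location_split_py locations = probe_location_split_py_alt locations
  unfold probe_location_split_py probe_location_split_py_alt
  rw [foldA_char]
  simp
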